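-- pv_equiv track=rewrite | github.com/Rodrigo30406/facial-recognition-lab | src/eleccia_listen/service.py | _closest_power_of_two
-- ===== SOURCE A (Python) =====
-- def _closest_power_of_two(value: int, min_value: int = 256, max_value: int = 4096) -> int:
--     clamped = max(min_value, min(max_value, int(value)))
--     lower = 1
--     while (lower * 2) <= clamped:
--         lower *= 2
--     upper = min(max_value, lower * 2)
--     if upper == lower:
--         return lower
--     if abs(clamped - lower) <= abs(upper - clamped):
--         return lower
--     return upper
-- ===== SOURCE B (Python) =====
-- def _closest_power_of_two(value: int, min_value: int = 256, max_value: int = 4096) -> int: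
--     clamped = max(min_value, min(max_value, int(value)))
--     lower = 1 if clamped < 2 else 1 << (clamped.bit_length() - 1)
--     upper = min(max_value, lower * 2)
--     if upper == lower:
--         return lower
--     return lower if abs(clamped - lower) <= abs(upper - clamped) else upper
-- ===== Notes on version B (the rewrite author's own statement) =====
-- stated objective: idiomatic
-- what changed: The doubling while-loop that finds the largest power of two <= clamped is replaced by a closed-form bit_length shift (1 << (clamped.bit_length()-1), guarded for clamped < 2).
import Mathlib
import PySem

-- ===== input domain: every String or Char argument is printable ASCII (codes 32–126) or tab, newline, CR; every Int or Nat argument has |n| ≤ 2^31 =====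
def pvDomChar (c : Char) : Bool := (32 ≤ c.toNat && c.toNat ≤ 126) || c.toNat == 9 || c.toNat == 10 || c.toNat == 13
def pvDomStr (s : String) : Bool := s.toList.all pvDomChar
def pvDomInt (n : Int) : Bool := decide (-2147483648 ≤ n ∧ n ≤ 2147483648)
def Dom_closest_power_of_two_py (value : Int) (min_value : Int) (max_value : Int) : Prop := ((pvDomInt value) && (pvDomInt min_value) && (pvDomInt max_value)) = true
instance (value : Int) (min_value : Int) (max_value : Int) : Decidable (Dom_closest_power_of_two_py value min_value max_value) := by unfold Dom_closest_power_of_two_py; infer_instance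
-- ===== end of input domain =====

-- B replaces A's doubling while-loop by a closed-form bit_length/log2 computation; same value everywhere.

-- ===== PORT A =====
-- the `while (lower * 2) <= clamped: lower *= 2` loop, as structural recursion
-- (the 0 < lower hypothesis only justifies termination; it is invariant from the start value 1)
def pyLoopA (clamped : Int) (lower : Int) (h : 0 < lower) : Int :=
  if h2 : lower * 2 ≤ clamped then pyLoopA clamped (lower * 2) (by omega) else lower
termination_by (clamped - lower).toNat
decreasing_by omega

def closest_power_of_two_py (value : Int) (min_value : Int) (max_value : Int) : Int :=
  let clamped := max min_value (min max_value value)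
  let lower := pyLoopA clamped 1 one_pos
  let upper := min max_value (lower * 2)
  if upper = lower then lower
  else if |clamped - lower| ≤ |upper - clamped| then lower else upper

-- ===== PORT B =====
-- `1 << (clamped.bit_length() - 1)` for clamped ≥ 2 is exactly 2 ^ (floor log2 of clamped),
-- i.e. 2 ^ Nat.log2 clamped.toNat (exact: bit_length n = Nat.log2 n + 1 for n ≥ 1)
def closest_power_of_two_py_alt (value : Int) (min_value : Int) (max_value : Int) : Int :=
  let clamped := max min_value (min max_value value)
  let lower : Int := if clamped < 2 then 1 else 2 ^ Nat.log2 clamped.toNat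
  let upper := min max_value (lower * 2)
  if upper = lower then lower
  else if |clamped - lower| ≤ |upper - clamped| then lower else upper

-- ===== PRECONDITION & SPEC =====
def Spec_closest_power_of_two_py (value : Int) (min_value : Int) (max_value : Int) (out : Int) : Prop := out = closest_power_of_two_py_alt value min_value max_value
instance (value : Int) (min_value : Int) (max_value : Int) (out : Int) : Decidable (Spec_closest_power_of_two_py value min_value max_value out) := by unfold Spec_closest_power_of_two_py; infer_instance

-- ===== CLAIM (what is proved, stated in full; the proofs are below) =====
def Claim_equal_closest_power_of_two_py : Prop := ∀ (value : Int) (min_value : Int) (max_value : Int), Dom_closest_power_of_two_py value min_value max_value → Spec_closest_power_of_two_py value min_value max_value (closest_power_of_two_py value min_value max_value)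

-- ===== LEMMAS AND PROOFS =====

-- loop invariant: starting from 2^k ≤ clamped, the loop lands on 2^(log2 clamped)
lemma pyLoopA_pow (d : Nat) (clamped : Int) (k : Nat)
    (hb : clamped.toNat ≤ 2 ^ k * 2 ^ d) (h : (2:Int) ^ k ≤ clamped) (hp : 0 < (2:Int) ^ k) :
    pyLoopA clamped ((2:Int) ^ k) hp = 2 ^ Nat.log2 clamped.toNat := by
  induction d generalizing k with
  | zero =>
    have hcast : ((2 ^ k : Nat) : Int) = (2:Int) ^ k := by push_cast; ring
    rw [pyLoopA]
    have : ¬ ((2:Int) ^ k * 2 ≤ clamped) := by omega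
    simp only [this, dif_neg, not_false_iff]
    have h1 : 2 ^ k ≤ clamped.toNat := by omega
    have h2 : clamped.toNat < 2 ^ (k + 1) := by
      have : (2:Nat) ^ (k+1) = 2 ^ k * 2 := by ring
      omega
    have hlog : Nat.log2 clamped.toNat = k := by
      rw [Nat.log2_eq_log_two]
      exact Nat.log_eq_of_pow_le_of_lt_pow h1 h2
    rw [hlog]
  | succ d ih =>
    rw [pyLoopA]
    by_cases h2 : (2:Int) ^ k * 2 ≤ clamped
    · simp only [h2, dif_pos]
      have hk1 : (2:Int) ^ k * 2 = (2:Int) ^ (k + 1) := by ring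
      have hb' : clamped.toNat ≤ 2 ^ (k + 1) * 2 ^ d := by
        have : (2:Nat) ^ (k+1) * 2 ^ d = 2 ^ k * 2 ^ (d+1) := by ring
        omega
      have := ih (k + 1) hb' (by omega) (by positivity)
      rw [← this]
      congr 1
    · simp only [h2, dif_neg, not_false_iff]
      have hcast : ((2 ^ k : Nat) : Int) = (2:Int) ^ k := by push_cast; ring
      have h1 : 2 ^ k ≤ clamped.toNat := by omega
      have h2' : clamped.toNat < 2 ^ (k + 1) := by
        have : (2:Nat) ^ (k+1) = 2 ^ k * 2 := by ring
        omega
      have hlog : Nat.log2 clamped.toNat = k := by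
        rw [Nat.log2_eq_log_two]
        exact Nat.log_eq_of_pow_le_of_lt_pow h1 h2'
      rw [hlog]

-- the loop started at 1 equals B's closed form
lemma pyLoopA_one (clamped : Int) (h : (0:Int) < 1) :
    pyLoopA clamped 1 h = if clamped < 2 then 1 else 2 ^ Nat.log2 clamped.toNat := by
  by_cases hc : clamped < 2
  · rw [pyLoopA]
    have : ¬ ((1:Int) * 2 ≤ clamped) := by omega
    simp [hc]
  · have h1 : (2:Int) ^ 0 ≤ clamped := by simp; omega
    have hb : clamped.toNat ≤ 2 ^ 0 * 2 ^ clamped.toNat := by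
      have := Nat.lt_two_pow_self (n := clamped.toNat)
      omega
    have := pyLoopA_pow clamped.toNat clamped 0 hb h1 (by norm_num)
    simp only [pow_zero] at this
    rw [this]
    simp [hc]

-- ===== VERDICT (by name: the statement is the Claim_ definition above) =====
theorem closest_power_of_two_py_spec : Claim_equal_closest_power_of_two_py := by
  intro value min_value max_value _
  simp only [Spec_closest_power_of_two_py, closest_power_of_two_py,
    closest_power_of_two_py_alt, pyLoopA_one]
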